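-- pv_equiv track=rewrite | github.com/ashtawy/DCMFlow | DCMFlow_094.py | convert_tree_dict2expression
-- ===== SOURCE A (Python) =====
-- import collections
--
-- def convert_tree_dict2expression(nltree):
--     """
--     Converts tree dictionary to text.
--     Example:
--     Input = nltree:
--         'l0': 'Root'
--         'l1': ['L1C1', 'L1C2']
--         'l2': ['L1C1_L2C1', 'L1C1_L2C2', 'L1C2_L2C3', 'L1C2_L2C4']
--     Output = tree_expression:
--         '((L1C1_L2C1,L1C1_L2C2)L1C1,(L1C2_L2C3,L1C2_L2C4)L1C2)Root;'
--     """
--     def find_children(parent, possible_children):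
--         children = []
--         for possible_child in possible_children:
--             if parent in possible_child:
--                 children.append(possible_child)
--         return children
--     nlevels = len(nltree) - 1
--     ndic = dict()
--     ndic['l'+str(nlevels)] = collections.OrderedDict()
--     for node in nltree['l'+str(nlevels)]:
--         ndic['l'+str(nlevels)][node] = node
--     for level in range(nlevels-1, 0, -1):
--         ndic['l'+str(level)] = collections.OrderedDict()
--         for node in nltree['l'+str(level)]:
--             node_children = find_children(node, nltree['l'+str(level+1)])
--             formatted_children = [ndic['l'+str(level+1)][nc] for nc in node_children]
--             ndic['l'+str(level)][node] = '(' + ','.join(formatted_children) + ')' + node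
--     tree_expression= '(' + ','.join([ndic['l1'][k] for k in ndic['l1']]) + ')Root;'
--     return tree_expression
-- ===== SOURCE B (Python) =====
-- def convert_tree_dict2expression(nltree):
--     nlevels = len(nltree) - 1
--
--     def build(node, level):
--         if level == nlevels:
--             return node
--         children = [c for c in nltree['l' + str(level + 1)] if node in c]
--         return '(' + ','.join(build(c, level + 1) for c in children) + ')' + node
--
--     # the distinct top-level nodes, in first-occurrence order
--     roots = dict.fromkeys(nltree['l1'])
--     return '(' + ','.join(build(k, 1) for k in roots) + ')Root;'
-- ===== Notes on version B (the rewrite author's own statement) =====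
-- stated objective: simpler
-- what changed: Replaced A's bottom-up level-by-level construction of per-level OrderedDict memo tables with a direct top-down recursive build over the same substring-matching child test, keeping the exact child order and the distinct-first-occurrence top level.
import Mathlib
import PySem

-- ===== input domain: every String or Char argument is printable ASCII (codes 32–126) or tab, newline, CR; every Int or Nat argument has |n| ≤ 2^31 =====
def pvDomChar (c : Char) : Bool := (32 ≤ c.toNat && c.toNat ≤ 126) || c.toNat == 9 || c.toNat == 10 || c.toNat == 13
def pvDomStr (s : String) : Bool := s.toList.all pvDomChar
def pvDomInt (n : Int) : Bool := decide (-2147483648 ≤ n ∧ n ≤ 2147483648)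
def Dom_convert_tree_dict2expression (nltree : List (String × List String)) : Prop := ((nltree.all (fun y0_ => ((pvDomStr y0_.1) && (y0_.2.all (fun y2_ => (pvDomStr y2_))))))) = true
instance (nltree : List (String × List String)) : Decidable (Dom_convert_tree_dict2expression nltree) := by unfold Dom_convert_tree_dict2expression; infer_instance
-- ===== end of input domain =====

-- B replaces A's bottom-up per-level OrderedDict memo tables with a top-down recursive build
-- (same substring child test, same order); objective: simpler. Equal on Pre_ (below).

-- both Pythons read nltree['l' + str(level)]:
def pvKey (level : Int) : String := "l" ++ PySem.Int.toStr level
def pvLvl (nltree : List (String × List String)) (level : Int) : List String :=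
  ((PySem.Dict.mk nltree).get? (pvKey level)).getD []

-- ===== PORT A =====
-- A's inner helper find_children (append loop)
def pvFindChildren (parent : String) (possible_children : List String) : List String :=
  possible_children.foldl (fun acc c => if PySem.Str.isIn parent c then acc ++ [c] else acc) []

def convert_tree_dict2expression (nltree : List (String × List String)) : String :=
  let nlevels : Int := (nltree.length : Int) - 1
  -- ndic['l'+str(nlevels)][node] = node for node in nltree['l'+str(nlevels)]
  let leaf : PySem.Dict String String :=
    (pvLvl nltree nlevels).foldl (fun d node => d.insert node node) PySem.Dict.empty
  let ndic0 : PySem.Dict String (PySem.Dict String String) :=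
    PySem.Dict.empty.insert (pvKey nlevels) leaf
  -- for level in range(nlevels-1, 0, -1): build ndic['l'+str(level)] from ndic['l'+str(level+1)]
  let ndic := (PySem.List.pyRange (nlevels - 1) 0 (-1)).foldl (fun nd level =>
      let cur : PySem.Dict String String :=
        (pvLvl nltree level).foldl (fun d node =>
          let node_children := pvFindChildren node (pvLvl nltree (level + 1))
          let formatted_children := node_children.map (fun nc =>
            (((nd.get? (pvKey (level + 1))).getD PySem.Dict.empty).get? nc).getD "")
          d.insert node ("(" ++ PySem.Str.join "," formatted_children ++ ")" ++ node))
          PySem.Dict.empty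
      nd.insert (pvKey level) cur) ndic0
  let l1 := (ndic.get? "l1").getD PySem.Dict.empty
  "(" ++ PySem.Str.join "," (l1.keys.map (fun k => (l1.get? k).getD "")) ++ ")Root;"

-- ===== PORT B =====
-- build(node, level): fuel counts the remaining levels, fuel = nlevels - level (0 ↔ level == nlevels)
def pvBuild (nltree : List (String × List String)) (level : Int) : Nat → String → String
  | 0, node => node
  | fuel + 1, node =>
      let children := (pvLvl nltree (level + 1)).filter (fun c => PySem.Str.isIn node c)
      "(" ++ PySem.Str.join "," (children.map (pvBuild nltree (level + 1) fuel)) ++ ")" ++ node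

def convert_tree_dict2expression_alt (nltree : List (String × List String)) : String :=
  let nlevels : Int := (nltree.length : Int) - 1
  -- roots = dict.fromkeys(nltree['l1']): the distinct top-level nodes in first-occurrence order
  let roots := PySem.List.dedup (pvLvl nltree 1)
  "(" ++ PySem.Str.join "," (roots.map (pvBuild nltree 1 (nlevels - 1).toNat)) ++ ")Root;"

-- ===== PRECONDITION & SPEC =====
-- Pre_ = the inputs A returns on: length ≥ 2 with keys 'l1'..'l(len-1)' present (otherwise A
-- raises KeyError), restricted to distinct association-list keys (duplicate keys cannot occur
-- in the Python dict argument this list models).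
def Pre_convert_tree_dict2expression (nltree : List (String × List String)) : Prop :=
  2 ≤ nltree.length ∧ (nltree.map Prod.fst).Nodup ∧
  (∀ l ∈ List.range' 1 (nltree.length - 1), ("l" ++ PySem.Int.toStr (l : Int)) ∈ nltree.map Prod.fst)
instance (nltree : List (String × List String)) : Decidable (Pre_convert_tree_dict2expression nltree) := by
  unfold Pre_convert_tree_dict2expression; infer_instance

def pvWitness_convert_tree_dict2expression : (List (String × List String)) :=
  [("l0", ["Root"]), ("l1", ["A", "B"]), ("l2", ["A1", "A2", "B1"])]

def Spec_convert_tree_dict2expression (nltree : List (String × List String)) (out : String) : Prop := out = convert_tree_dict2expression_alt nltree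
instance (nltree : List (String × List String)) (out : String) : Decidable (Spec_convert_tree_dict2expression nltree out) := by unfold Spec_convert_tree_dict2expression; infer_instance

-- ===== CLAIM (what is proved, stated in full; the proofs are below) =====
def Claim_equal_convert_tree_dict2expression : Prop := ∀ (nltree : List (String × List String)), Dom_convert_tree_dict2expression nltree → Pre_convert_tree_dict2expression nltree → Spec_convert_tree_dict2expression nltree (convert_tree_dict2expression nltree)

-- ===== LEMMAS AND PROOFS =====

-- A's level-loop body, named for the proofs (definitionally the fold body of the port)
def pvBody (nltree : List (String × List String))
    (nd : PySem.Dict String (PySem.Dict String String)) (level : Int) :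
    PySem.Dict String (PySem.Dict String String) :=
  nd.insert (pvKey level)
    ((pvLvl nltree level).foldl (fun d node =>
        d.insert node ("(" ++ PySem.Str.join ","
          ((pvFindChildren node (pvLvl nltree (level + 1))).map (fun nc =>
            (((nd.get? (pvKey (level + 1))).getD PySem.Dict.empty).get? nc).getD "")) ++ ")" ++ node))
      PySem.Dict.empty)

-- an insert loop whose value depends only on the node: its lookup
theorem pvDictFoldGet (L : List String) (f : String → String)
    (d0 : PySem.Dict String String) (x : String) :
    (L.foldl (fun d node => d.insert node (f node)) d0).get? x
      = if x ∈ L then some (f x) else d0.get? x := by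
  induction L generalizing d0 with
  | nil => simp
  | cons a t ih =>
      simp only [List.foldl_cons, ih, List.mem_cons]
      by_cases hxt : x ∈ t <;> by_cases hxa : x = a <;>
        simp [hxt, hxa, PySem.Dict.get?_insert]

-- and its keys
theorem pvDictFoldKeys (L : List String) (f : String → String) :
    (L.foldl (fun d node => d.insert node (f node)) PySem.Dict.empty).keys
      = PySem.Set.ofList L := by
  have h := PySem.Dict.keys_foldl_insert L (fun _ node => f node) PySem.Dict.empty
  simpa [PySem.Dict.keys_empty, PySem.Set.update_nil_left] using h

-- the invariant A's level loop maintains, phrased with B's recursion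
def pvGood (nltree : List (String × List String))
    (nd : PySem.Dict String (PySem.Dict String String)) (level : Int) (fuel : Nat) : Prop :=
  ((nd.get? (pvKey level)).getD PySem.Dict.empty).keys = PySem.Set.ofList (pvLvl nltree level) ∧
  ∀ x, ((nd.get? (pvKey level)).getD PySem.Dict.empty).get? x
      = if x ∈ pvLvl nltree level then some (pvBuild nltree level fuel x) else none

-- one iteration of A's level loop
theorem pvStep (nltree : List (String × List String))
    (nd : PySem.Dict String (PySem.Dict String String)) (level : Int) (fuel : Nat)
    (h : pvGood nltree nd (level + 1) fuel) :
    pvGood nltree (pvBody nltree nd level) level (fuel + 1) := by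
  obtain ⟨hk, hg⟩ := h
  have hfc : ∀ node : String, pvFindChildren node (pvLvl nltree (level + 1))
      = (pvLvl nltree (level + 1)).filter (fun c => PySem.Str.isIn node c) := by
    intro node
    simpa [pvFindChildren] using PySem.List.foldl_append_if_eq_filter
      (fun c => PySem.Str.isIn node c) (pvLvl nltree (level + 1)) []
  have hval : ∀ node : String,
      ("(" ++ PySem.Str.join ","
        ((pvFindChildren node (pvLvl nltree (level + 1))).map (fun nc =>
          (((nd.get? (pvKey (level + 1))).getD PySem.Dict.empty).get? nc).getD "")) ++ ")" ++ node)
      = pvBuild nltree level (fuel + 1) node := by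
    intro node
    rw [hfc node]
    have hmap : ((pvLvl nltree (level + 1)).filter (fun c => PySem.Str.isIn node c)).map
          (fun nc => (((nd.get? (pvKey (level + 1))).getD PySem.Dict.empty).get? nc).getD "")
        = ((pvLvl nltree (level + 1)).filter (fun c => PySem.Str.isIn node c)).map
          (pvBuild nltree (level + 1) fuel) := by
      refine List.map_congr_left ?_
      intro nc hnc
      have hmem : nc ∈ pvLvl nltree (level + 1) := (List.mem_filter.mp hnc).1
      rw [hg nc, if_pos hmem]
      rfl
    rw [hmap]
    rfl
  have hfun : (fun (d : PySem.Dict String String) node =>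
      d.insert node ("(" ++ PySem.Str.join ","
        ((pvFindChildren node (pvLvl nltree (level + 1))).map (fun nc =>
          (((nd.get? (pvKey (level + 1))).getD PySem.Dict.empty).get? nc).getD "")) ++ ")" ++ node))
      = fun d node => d.insert node (pvBuild nltree level (fuel + 1) node) := by
    funext d node
    rw [hval node]
  constructor
  · rw [pvBody, PySem.Dict.get?_insert_self]
    simp only [Option.getD_some]
    rw [hfun]
    exact pvDictFoldKeys (pvLvl nltree level) _
  · intro x
    rw [pvBody, PySem.Dict.get?_insert_self]
    simp only [Option.getD_some]
    rw [hfun, pvDictFoldGet (pvLvl nltree level) (pvBuild nltree level (fuel + 1)) PySem.Dict.empty x]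
    by_cases hx : x ∈ pvLvl nltree level
    · rw [if_pos hx, if_pos hx]
    · rw [if_neg hx, if_neg hx, PySem.Dict.get?_empty]

-- the whole countdown loop, by induction on the number of remaining levels
theorem pvFoldGood (nltree : List (String × List String)) (m : Nat) :
    ∀ (fuel : Nat) (nd : PySem.Dict String (PySem.Dict String String)),
    pvGood nltree nd ((m : Int) + 1) fuel →
    pvGood nltree ((PySem.List.pyRange (m : Int) 0 (-1)).foldl (pvBody nltree) nd) 1 (fuel + m) := by
  induction m with
  | zero =>
      intro fuel nd h
      rw [PySem.List.pyRange_neg_one_eq_nil (by omega)]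
      simpa using h
  | succ m ih =>
      intro fuel nd h
      have hcons : PySem.List.pyRange ((m + 1 : Nat) : Int) 0 (-1)
          = ((m + 1 : Nat) : Int) :: PySem.List.pyRange ((m : Nat) : Int) 0 (-1) := by
        rw [PySem.List.pyRange_neg_one_cons (by push_cast; omega)]
        have h1 : ((m + 1 : Nat) : Int) - 1 = ((m : Nat) : Int) := by omega
        rw [h1]
      rw [hcons, List.foldl_cons]
      have hstep := pvStep nltree nd ((m + 1 : Nat) : Int) fuel h
      have hcast : ((m + 1 : Nat) : Int) = ((m : Nat) : Int) + 1 := by omega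
      rw [hcast] at hstep
      have hres := ih (fuel + 1) (pvBody nltree nd (((m : Nat) : Int) + 1)) hstep
      have hfe : fuel + 1 + m = fuel + (m + 1) := by omega
      rwa [hfe] at hres

-- the final ndic of A's port, named for the proofs (definitionally A's fold)
def pvNdic (nltree : List (String × List String)) : PySem.Dict String (PySem.Dict String String) :=
  (PySem.List.pyRange ((nltree.length : Int) - 1 - 1) 0 (-1)).foldl (pvBody nltree)
    (PySem.Dict.empty.insert (pvKey ((nltree.length : Int) - 1))
      ((pvLvl nltree ((nltree.length : Int) - 1)).foldl (fun d node => d.insert node node)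
        PySem.Dict.empty))

theorem pvA_char (nltree : List (String × List String)) : convert_tree_dict2expression nltree
    = "(" ++ PySem.Str.join ","
        ((((pvNdic nltree).get? "l1").getD PySem.Dict.empty).keys.map
          (fun k => ((((pvNdic nltree).get? "l1").getD PySem.Dict.empty).get? k).getD ""))
      ++ ")Root;" := rfl

theorem pvB_char (nltree : List (String × List String)) : convert_tree_dict2expression_alt nltree
    = "(" ++ PySem.Str.join ","
        ((PySem.List.dedup (pvLvl nltree 1)).map (pvBuild nltree 1 ((nltree.length : Int) - 1 - 1).toNat))
      ++ ")Root;" := rfl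

theorem pvMain (nltree : List (String × List String)) (h2 : 2 ≤ nltree.length) :
    convert_tree_dict2expression nltree = convert_tree_dict2expression_alt nltree := by
  have hm1 : ((nltree.length - 2 : Nat) : Int) + 1 = (nltree.length : Int) - 1 := by omega
  have hm2 : ((nltree.length - 2 : Nat) : Int) = (nltree.length : Int) - 1 - 1 := by omega
  have hgood0 : pvGood nltree
      (PySem.Dict.empty.insert (pvKey ((nltree.length : Int) - 1))
        ((pvLvl nltree ((nltree.length : Int) - 1)).foldl (fun d node => d.insert node node)
          PySem.Dict.empty))
      ((nltree.length : Int) - 1) 0 := by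
    constructor
    · rw [PySem.Dict.get?_insert_self]
      simp only [Option.getD_some]
      exact pvDictFoldKeys _ (fun node => node)
    · intro x
      rw [PySem.Dict.get?_insert_self]
      simp only [Option.getD_some]
      rw [pvDictFoldGet _ (fun node => node) PySem.Dict.empty x]
      by_cases hx : x ∈ pvLvl nltree ((nltree.length : Int) - 1)
      · rw [if_pos hx, if_pos hx]
        rfl
      · rw [if_neg hx, if_neg hx, PySem.Dict.get?_empty]
  have hgood := pvFoldGood nltree (nltree.length - 2) 0 _ (by rw [hm1]; exact hgood0)
  rw [hm2, Nat.zero_add] at hgood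
  have hgood' : pvGood nltree (pvNdic nltree) 1 (nltree.length - 2) := hgood
  obtain ⟨hk, hg⟩ := hgood'
  have hkey1 : pvKey 1 = "l1" := by decide
  rw [hkey1] at hk hg
  have hk' : (((pvNdic nltree).get? "l1").getD PySem.Dict.empty).keys
      = PySem.List.dedup (pvLvl nltree 1) := by
    rw [hk]
    rfl
  rw [pvA_char, pvB_char, hk']
  have hfuel : nltree.length - 2 = ((nltree.length : Int) - 1 - 1).toNat := by omega
  have hmap : (PySem.List.dedup (pvLvl nltree 1)).map
        (fun k => ((((pvNdic nltree).get? "l1").getD PySem.Dict.empty).get? k).getD "")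
      = (PySem.List.dedup (pvLvl nltree 1)).map
          (pvBuild nltree 1 ((nltree.length : Int) - 1 - 1).toNat) := by
    refine List.map_congr_left ?_
    intro k hkmem
    have hkmem' : k ∈ pvLvl nltree 1 := by
      have : k ∈ PySem.Set.ofList (pvLvl nltree 1) := hkmem
      exact (PySem.Set.mem_ofList _ _).mp this
    rw [hg k, if_pos hkmem', Option.getD_some, ← hfuel]
  rw [hmap]

-- ===== VERDICT (by name: the statement is the Claim_ definition above) =====
theorem convert_tree_dict2expression_spec : Claim_equal_convert_tree_dict2expression := by
  intro nltree _hdom hpre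
  exact pvMain nltree hpre.1
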